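-- pv_equiv track=rewrite | github.com/vmevada102/insilicopcr | insilico_pcr_parallel_multifasta.py | find_approx_matches
-- ===== SOURCE A (Python) =====
-- from typing import List, Tuple, Dict
--
-- IUPAC = {
--     'A': {'A'}, 'C': {'C'}, 'G': {'G'}, 'T': {'T'}, 'U': {'T'},
--     'R': {'A','G'}, 'Y': {'C','T'}, 'S': {'G','C'}, 'W': {'A','T'},
--     'K': {'G','T'}, 'M': {'A','C'}, 'B': {'C','G','T'}, 'D': {'A','G','T'},
--     'H': {'A','C','T'}, 'V': {'A','C','G'}, 'N': {'A','C','G','T'}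
-- }
--
-- def primer_allowed_set(primer: str):
--     return [IUPAC.get(ch, {'A','C','G','T'}) for ch in primer.upper()]
--
-- def count_mismatches(seg: str, allowed_sets: List[set]) -> int:
--     mism = 0
--     for b, allow in zip(seg, allowed_sets):
--         if b not in allow:
--             mism += 1
--     return mism
--
-- def find_approx_matches(seq: str, primer: str, max_mismatch: int) -> List[Tuple[int,int,int]]:
--     L = len(primer)
--     if L == 0 or len(seq) < L:
--         return []
--     allowed = primer_allowed_set(primer)
--     hits = []
--     # naive sliding window (fast enough for bacterial-size sequences)
--     for i in range(0, len(seq) - L + 1):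
--         seg = seq[i:i+L]
--         mm = count_mismatches(seg, allowed)
--         if mm <= max_mismatch:
--             hits.append((i, i+L, mm))
--     return hits
-- ===== SOURCE B (Python) =====
-- # B: transposed accumulation -- one mismatch-count array updated column-by-column
-- # over primer positions, then a single collection pass (no per-window slicing).
-- IUPAC = {
--     'A': {'A'}, 'C': {'C'}, 'G': {'G'}, 'T': {'T'}, 'U': {'T'},
--     'R': {'A','G'}, 'Y': {'C','T'}, 'S': {'G','C'}, 'W': {'A','T'},
--     'K': {'G','T'}, 'M': {'A','C'}, 'B': {'C','G','T'}, 'D': {'A','G','T'},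
--     'H': {'A','C','T'}, 'V': {'A','C','G'}, 'N': {'A','C','G','T'}
-- }
--
-- def find_approx_matches(seq, primer, max_mismatch):
--     L = len(primer)
--     n = len(seq)
--     if L == 0 or n < L:
--         return []
--     counts = [0] * (n - L + 1)
--     for j, ch in enumerate(primer.upper()):
--         allow = IUPAC.get(ch, {'A', 'C', 'G', 'T'})
--         counts = [c + (0 if seq[i + j] in allow else 1) for i, c in enumerate(counts)]
--     return [(i, i + L, mm) for i, mm in enumerate(counts) if mm <= max_mismatch]
-- ===== Notes on version B (the rewrite author's own statement) =====
-- stated objective: alternative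
-- what changed: A slides a window over seq, slicing out each segment and counting its mismatches against the primer's IUPAC sets; B never slices: it keeps one mismatch-count array over all window starts and updates it column-by-column per primer position, then collects the hits in a single final pass.
import Mathlib
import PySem

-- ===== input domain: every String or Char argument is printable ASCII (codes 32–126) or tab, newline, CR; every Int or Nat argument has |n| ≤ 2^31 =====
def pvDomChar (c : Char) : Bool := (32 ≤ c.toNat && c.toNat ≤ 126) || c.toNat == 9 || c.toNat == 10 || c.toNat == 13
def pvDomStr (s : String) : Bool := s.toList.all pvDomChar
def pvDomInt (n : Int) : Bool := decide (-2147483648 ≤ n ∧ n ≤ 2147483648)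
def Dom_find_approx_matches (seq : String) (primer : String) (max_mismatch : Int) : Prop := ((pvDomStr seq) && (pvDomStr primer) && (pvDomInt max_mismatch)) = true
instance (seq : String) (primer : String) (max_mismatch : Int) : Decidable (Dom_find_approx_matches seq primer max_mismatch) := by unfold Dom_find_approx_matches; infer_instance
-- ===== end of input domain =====

-- B replaces A's per-window slice-and-count with a column-wise mismatch-count array; alternative structure, same exact results.


-- ===== PORT A =====
-- the IUPAC dict with .get default {'A','C','G','T'}; only membership is used, so a set is a distinct-element list
def pvIupacGet (c : Char) : List Char :=
  match c with
  | 'A' => ['A'] | 'C' => ['C'] | 'G' => ['G'] | 'T' => ['T'] | 'U' => ['T']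
  | 'R' => ['A','G'] | 'Y' => ['C','T'] | 'S' => ['G','C'] | 'W' => ['A','T']
  | 'K' => ['G','T'] | 'M' => ['A','C'] | 'B' => ['C','G','T'] | 'D' => ['A','G','T']
  | 'H' => ['A','C','T'] | 'V' => ['A','C','G'] | 'N' => ['A','C','G','T']
  | _ => ['A','C','G','T']

def pvPrimerAllowedSet (primer : String) : List (List Char) :=
  (PySem.Chars.upper primer.toList).map pvIupacGet

def pvCountMismatches (seg : List Char) (allowed : List (List Char)) : Int :=
  (seg.zip allowed).foldl (fun m p => if p.1 ∈ p.2 then m else m + 1) 0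

def find_approx_matches (seq : String) (primer : String) (max_mismatch : Int) : List (Int × Int × Int) :=
  let s := seq.toList
  let L : Int := (primer.toList.length : Int)
  if L = 0 ∨ (s.length : Int) < L then []
  else
    let allowed := pvPrimerAllowedSet primer
    (PySem.List.pyRange 0 ((s.length : Int) - L + 1) 1).foldl
      (fun hits i =>
        let seg := PySem.List.slice s (some i) (some (i + L))
        let mm := pvCountMismatches seg allowed
        if mm ≤ max_mismatch then hits ++ [(i, i + L, mm)] else hits) []

-- ===== PORT B =====
def find_approx_matches_alt (seq : String) (primer : String) (max_mismatch : Int) : List (Int × Int × Int) :=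
  let s := seq.toList
  let L : Int := (primer.toList.length : Int)
  let n : Int := (s.length : Int)
  if L = 0 ∨ n < L then []
  else
    let counts0 : List Int := List.replicate (n - L + 1).toNat 0
    let counts := (PySem.List.enumerate (PySem.Chars.upper primer.toList)).foldl
      (fun cs jc =>
        let allow := pvIupacGet jc.2
        (PySem.List.enumerate cs).map
          (fun ic => ic.2 + (if PySem.List.pyGetD s (ic.1 + jc.1) ' ' ∈ allow then 0 else 1)))
      counts0
    (PySem.List.enumerate counts).filterMap
      (fun im => if im.2 ≤ max_mismatch then some (im.1, im.1 + L, im.2) else none)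

-- ===== PRECONDITION & SPEC =====
def Spec_find_approx_matches (seq : String) (primer : String) (max_mismatch : Int) (out : List (Int × Int × Int)) : Prop := out = find_approx_matches_alt seq primer max_mismatch
instance (seq : String) (primer : String) (max_mismatch : Int) (out : List (Int × Int × Int)) : Decidable (Spec_find_approx_matches seq primer max_mismatch out) := by unfold Spec_find_approx_matches; infer_instance

-- ===== CLAIM (what is proved, stated in full; the proofs are below) =====
def Claim_equal_find_approx_matches : Prop := ∀ (seq : String) (primer : String) (max_mismatch : Int), Dom_find_approx_matches seq primer max_mismatch → Spec_find_approx_matches seq primer max_mismatch (find_approx_matches seq primer max_mismatch)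

-- ===== LEMMAS AND PROOFS =====

-- mismatch count of the primer suffix `cs` laid over `s` starting at position `i`
def pvMmF (s : List Char) : Int → List Char → Int
  | _, [] => 0
  | i, c :: cs => (if PySem.List.pyGetD s i ' ' ∈ pvIupacGet c then 0 else 1) + pvMmF s (i + 1) cs

theorem pvEnum_length {α : Type} (xs : List α) (j : Int) :
    (PySem.List.enumerate xs j).length = xs.length := by
  induction xs generalizing j with
  | nil => rfl
  | cons x t ih => simp [PySem.List.enumerate, ih]

theorem pvEnum_getElem {α : Type} (xs : List α) (j : Int) (k : Nat)
    (h : k < (PySem.List.enumerate xs j).length) :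
    (PySem.List.enumerate xs j)[k] = (j + k, xs[k]'(by simpa [pvEnum_length] using h)) := by
  induction xs generalizing j k with
  | nil => simp [PySem.List.enumerate] at h
  | cons x t ih =>
    cases k with
    | zero => simp [PySem.List.enumerate]
    | succ k =>
      have h' : k < (PySem.List.enumerate t (j + 1)).length := by
        simpa [PySem.List.enumerate] using h
      simp [PySem.List.enumerate, ih (j + 1) k h']
      omega

-- A's inner fold over the zipped window equals pvMmF
theorem pvA_fold (s : List Char) (up : List Char) :
    ∀ (i : Nat) (acc : Int), i + up.length ≤ s.length →
      (((List.take up.length (List.drop i s)).zip (up.map pvIupacGet)).foldl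
        (fun m p => if p.1 ∈ p.2 then m else m + 1) acc) = acc + pvMmF s (i : Int) up := by
  induction up with
  | nil => intro i acc _; simp [pvMmF]
  | cons c cs ih =>
    intro i acc h
    have hi : i < s.length := by simp at h; omega
    have hdrop : List.drop i s = s[i] :: List.drop (i + 1) s :=
      (List.getElem_cons_drop (as := s) (i := i) hi).symm
    have hget : PySem.List.pyGetD s (i : Int) ' ' = s[i] := by
      simp [PySem.List.pyGetD_natCast, List.getD_eq_getElem?_getD, List.getElem?_eq_getElem hi]
    rw [hdrop]
    simp only [List.length_cons, List.take_succ_cons, List.map_cons, List.zip_cons_cons,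
      List.foldl_cons]
    have h' : (i + 1) + cs.length ≤ s.length := by simp at h; omega
    rw [ih (i + 1) _ h']
    simp only [pvMmF, hget]
    push_cast
    split_ifs <;> ring

-- one column update, on a counts list of the canonical map-over-range shape
theorem pvCol_step (s : List Char) (K : Nat) (f : Nat → Int) (j : Int) (c : Char) :
    (PySem.List.enumerate ((List.range K).map f)).map
      (fun ic => ic.2 + (if PySem.List.pyGetD s (ic.1 + j) ' ' ∈ pvIupacGet c then 0 else 1))
    = (List.range K).map
      (fun k => f k + (if PySem.List.pyGetD s ((k : Int) + j) ' ' ∈ pvIupacGet c then 0 else 1)) := by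
  apply List.ext_getElem
  · simp
  · intro k h1 h2
    have hk : k < K := by simpa using h2
    have he : k < (PySem.List.enumerate ((List.range K).map f) 0).length := by
      rw [pvEnum_length]; simpa using hk
    simp only [List.getElem_map, pvEnum_getElem _ _ _ he, List.getElem_range]
    simp

-- the whole column fold turns the zero array into the pvMmF array
theorem pvCol_fold (s : List Char) (up : List Char) :
    ∀ (j : Int) (K : Nat) (f : Nat → Int),
      (PySem.List.enumerate up j).foldl
        (fun cs jc =>
          (PySem.List.enumerate cs).map
            (fun ic => ic.2 + (if PySem.List.pyGetD s (ic.1 + jc.1) ' ' ∈ pvIupacGet jc.2 then 0 else 1)))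
        ((List.range K).map f)
      = (List.range K).map (fun k => f k + pvMmF s ((k : Int) + j) up) := by
  induction up with
  | nil => intro j K f; simp [PySem.List.enumerate, pvMmF]
  | cons c cs ih =>
    intro j K f
    simp only [PySem.List.enumerate, List.foldl_cons]
    rw [pvCol_step s K f j c, ih (j + 1) K]
    apply List.map_congr_left
    intro k _
    simp only [pvMmF]
    ring_nf

theorem pvEnum_map_range {β : Type} (g : Nat → β) (K : Nat) :
    PySem.List.enumerate ((List.range K).map g) 0 = (List.range K).map (fun k : Nat => ((k : Int), g k)) := by
  apply List.ext_getElem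
  · simp
  · intro k h1 h2
    have hk : k < K := by simpa using h2
    have he : k < (PySem.List.enumerate ((List.range K).map g) 0).length := by
      rw [pvEnum_length]; simpa using hk
    simp [pvEnum_getElem _ _ _ he]

theorem pvMapFilter {α β : Type} (p : α → Bool) (f : α → β) (l : List α) :
    (List.filter p l).map f = List.filterMap (fun x => if p x then some (f x) else none) l := by
  induction l with
  | nil => rfl
  | cons a t ih => by_cases h : p a <;> simp [h, ih]

-- ===== VERDICT (by name: the statement is the Claim_ definition above) =====
theorem find_approx_matches_spec : Claim_equal_find_approx_matches := by
  intro seq primer mmx _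
  unfold Spec_find_approx_matches find_approx_matches find_approx_matches_alt
  dsimp only
  by_cases hg : ((primer.toList.length : Int) = 0 ∨ ((seq.toList.length : Int) < (primer.toList.length : Int)))
  · rw [if_pos hg, if_pos hg]
  · rw [if_neg hg, if_neg hg]
    have hL0 : (primer.toList.length : Int) ≠ 0 := fun h => hg (Or.inl h)
    have hLn : ¬ ((seq.toList.length : Int) < (primer.toList.length : Int)) := fun h => hg (Or.inr h)
    set s := seq.toList with hs
    have hL1 : 1 ≤ primer.toList.length := by
      by_contra h
      exact hL0 (by omega)
    have hLen : primer.toList.length ≤ s.length := by exact_mod_cast not_lt.mp hLn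
    set Ln := primer.toList.length with hLdef
    set K := s.length - Ln + 1 with hK
    have hKi : ((s.length : Int) - (Ln : Int) + 1) = (K : Int) := by push_cast [hK]; omega
    have htoNat : ((s.length : Int) - (Ln : Int) + 1).toNat = K := by
      rw [hKi]; exact Int.toNat_natCast K
    set up := PySem.Chars.upper primer.toList with hup
    have hupl : up.length = Ln := by
      simp only [hup, PySem.Chars.upper, List.length_map]
      rfl
    -- B side: the counts array is exactly the pvMmF array over window starts
    rw [htoNat]
    have hrep : (List.replicate K (0:Int)) = (List.range K).map (fun _ => (0:Int)) := by simp
    rw [hrep, pvCol_fold s up 0 K (fun _ => 0), pvEnum_map_range, List.filterMap_map]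
    -- A side: rewrite the fold over the range window by window, then flatten it
    rw [hKi, PySem.List.pyRange_zero_natCast K, List.foldl_map]
    rw [PySem.List.foldl_congr_mem (List.range K) _
      (fun hits (k : Nat) => if decide (pvMmF s (k : Int) up ≤ mmx) = true then
        hits ++ [((k : Int), (k : Int) + (Ln : Int), pvMmF s (k : Int) up)] else hits) []
      ?_]
    · rw [PySem.List.foldl_append_if, pvMapFilter]
      simp only [List.nil_append]
      apply List.filterMap_congr
      intro k _
      simp [decide_eq_true_eq]
    · intro acc k hk
      have hkK : k < K := List.mem_range.mp hk
      have hcast : (k : Int) + (Ln : Int) = ((k + Ln : Nat) : Int) := by push_cast; ring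
      have hslice : PySem.List.slice s (some (k : Int)) (some ((k : Int) + (Ln : Int)))
          = List.take Ln (List.drop k s) := by
        rw [hcast, PySem.List.slice_natCast s k (k + Ln)]
        congr 1
        omega
      simp only [hslice, pvPrimerAllowedSet, ← hup, pvCountMismatches]
      have hb : k + up.length ≤ s.length := by rw [hupl]; omega
      rw [← hupl, pvA_fold s up k 0 hb]
      simp only [zero_add, decide_eq_true_eq]
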